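-- pv_equiv track=rewrite | github.com/RusieckiRoland/LocalAI-RAG | tests/integration/retrival/test_fetch_node_texts_expectations.py | _expected_graph_first_order
-- ===== SOURCE A (Python) =====
-- def _expected_graph_first_order(
--     seed_ids: list[str],
--     graph_ids: list[str],
--     depth_map: dict[str, int],
--     parent_map: dict[str, str | None],
-- ) -> list[str]:
--     seed_set = set(seed_ids)
--     graph_only = [nid for nid in graph_ids if nid not in seed_set]
--     graph_sorted = sorted(graph_only, key=lambda nid: (depth_map.get(nid, 999999), nid))
--
--     def _root_seed(node_id: str) -> str | None:
--         cur = node_id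
--         guard = 0
--         while guard < 10000:
--             guard += 1
--             p = parent_map.get(cur, None)
--             if p is None:
--                 return cur if cur in seed_set else None
--             cur = p
--         return None
--
--     descendants: dict[str, list[str]] = {s: [] for s in seed_ids}
--     for node_id in graph_sorted:
--         root = _root_seed(node_id)
--         if root in descendants:
--             descendants[root].append(node_id)
--
--     ordered: list[str] = []
--     for seed in seed_ids:
--         ordered.append(seed)
--         ordered.extend(descendants.get(seed, []))
--     return ordered
-- ===== SOURCE B (Python) =====
-- def _expected_graph_first_order(
--     seed_ids: list[str],
--     graph_ids: list[str],
--     depth_map: dict[str, int],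
--     parent_map: dict[str, str | None],
-- ) -> list[str]:
--     seed_set = set(seed_ids)
--
--     def _root_seed(node_id: str) -> str | None:
--         cur = node_id
--         for _ in range(10000):
--             p = parent_map.get(cur, None)
--             if p is None:
--                 return cur if cur in seed_set else None
--             cur = p
--         return None
--
--     # one unsorted pass assigning nodes to per-seed buckets; each bucket is
--     # sorted on its own just before being emitted (no global sort, no
--     # pre-filtered intermediate list, no pre-initialised dict of all seeds)
--     buckets: dict[str, list[str]] = {}
--     for nid in graph_ids:
--         if nid in seed_set:
--             continue
--         root = _root_seed(nid)
--         if root is not None and root in seed_set: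
--             buckets.setdefault(root, []).append(nid)
--
--     ordered: list[str] = []
--     for seed in seed_ids:
--         ordered.append(seed)
--         ordered.extend(
--             sorted(buckets.get(seed, []), key=lambda n: (depth_map.get(n, 999999), n))
--         )
--     return ordered
-- ===== Notes on version B (the rewrite author's own statement) =====
-- stated objective: alternative
-- what changed: Instead of globally sorting all non-seed nodes and then stable-partitioning them into a pre-initialised per-seed dict, B makes one unsorted pass over graph_ids bucketing each node under its resolved seed root and sorts each bucket individually when it is emitted (it never sorts nodes that belong to no seed).
import Mathlib
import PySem

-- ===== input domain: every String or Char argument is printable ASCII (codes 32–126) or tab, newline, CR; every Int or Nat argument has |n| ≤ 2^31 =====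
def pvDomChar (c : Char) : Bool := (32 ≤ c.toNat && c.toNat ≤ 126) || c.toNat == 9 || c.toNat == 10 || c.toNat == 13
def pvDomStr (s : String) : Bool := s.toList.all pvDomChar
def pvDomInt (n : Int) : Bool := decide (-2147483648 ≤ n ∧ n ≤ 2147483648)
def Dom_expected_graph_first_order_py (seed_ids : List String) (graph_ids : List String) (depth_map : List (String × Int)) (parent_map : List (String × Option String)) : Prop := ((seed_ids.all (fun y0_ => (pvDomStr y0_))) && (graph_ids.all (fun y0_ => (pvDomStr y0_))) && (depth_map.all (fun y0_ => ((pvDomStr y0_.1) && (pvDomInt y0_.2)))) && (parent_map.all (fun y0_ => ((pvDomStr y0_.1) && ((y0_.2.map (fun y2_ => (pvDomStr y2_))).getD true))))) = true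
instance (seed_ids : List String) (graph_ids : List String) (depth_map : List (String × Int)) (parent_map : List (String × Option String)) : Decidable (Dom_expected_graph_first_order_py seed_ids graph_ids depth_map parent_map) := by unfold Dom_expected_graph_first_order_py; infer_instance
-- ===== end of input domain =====

-- B replaces A's global sort + stable partition into a pre-initialised per-seed dict by one
-- unsorted bucketing pass followed by a per-bucket sort (alternative decomposition, same results).

-- ===== PORT A =====
-- shared transliteration of the inner `_root_seed` helper, which is verbatim identical in A and
-- in B: the guarded while/for loop (at most 10000 iterations) becomes fuel recursion, and
-- `parent_map.get(cur, None)` flattens a missing key and a stored None alike.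
def pvRootSeed (seed_set : PySem.Set String) (pm : PySem.Dict String (Option String)) : Nat → String → Option String
  | 0, _ => none
  | fuel+1, cur =>
    match (pm.get? cur).getD none with
    | none => if PySem.Set.contains seed_set cur then some cur else none
    | some p => pvRootSeed seed_set pm fuel p

-- body of A's grouping loop (named so the proofs can speak about it)
def pvStepA (root : String → Option String) (d : PySem.Dict String (List String)) (node : String) : PySem.Dict String (List String) :=
  match root node with
  | some r => if d.contains r then d.modify r [] (fun v => v ++ [node]) else d
  | none => d

def expected_graph_first_order_py (seed_ids : List String) (graph_ids : List String) (depth_map : List (String × Int)) (parent_map : List (String × Option String)) : List String :=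
  let seed_set : PySem.Set String := PySem.Set.ofList seed_ids
  let graph_only := graph_ids.filter (fun nid => !(PySem.Set.contains seed_set nid))
  let dm : PySem.Dict String Int := PySem.Dict.mk depth_map
  let graph_sorted := PySem.List.sorted2 graph_only (fun nid => dm.getD nid 999999) (fun nid => nid)
  let pm : PySem.Dict String (Option String) := PySem.Dict.mk parent_map
  -- descendants = {s: [] for s in seed_ids}
  let desc0 : PySem.Dict String (List String) := seed_ids.foldl (fun d s => d.insert s ([] : List String)) (PySem.Dict.mk [])
  -- `if root in descendants: descendants[root].append(node_id)`  (None is never a key)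
  let descendants := graph_sorted.foldl (pvStepA (pvRootSeed seed_set pm 10000)) desc0
  seed_ids.foldl (fun acc seed => acc ++ [seed] ++ descendants.getD seed []) []

-- ===== PORT B =====
-- body of B's bucketing loop (named so the proofs can speak about it); `setdefault(root, []).append(nid)`
-- is exactly an overwrite of the key's value with the appended list (the key's position is kept)
def pvStepB (c : String → Bool) (root : String → Option String) (d : PySem.Dict String (List String)) (nid : String) : PySem.Dict String (List String) :=
  if c nid then d
  else match root nid with
    | some r => if c r then d.insert r (d.getD r [] ++ [nid]) else d
    | none => d

def expected_graph_first_order_py_alt (seed_ids : List String) (graph_ids : List String) (depth_map : List (String × Int)) (parent_map : List (String × Option String)) : List String :=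
  let seed_set : PySem.Set String := PySem.Set.ofList seed_ids
  let pm : PySem.Dict String (Option String) := PySem.Dict.mk parent_map
  let dm : PySem.Dict String Int := PySem.Dict.mk depth_map
  -- one unsorted pass assigning each non-seed node to its seed root's bucket
  let buckets : PySem.Dict String (List String) := graph_ids.foldl
      (pvStepB (PySem.Set.contains seed_set) (pvRootSeed seed_set pm 10000)) (PySem.Dict.mk [])
  seed_ids.foldl (fun acc seed =>
      acc ++ [seed] ++ PySem.List.sorted2 (buckets.getD seed []) (fun n => dm.getD n 999999) (fun n => n)) []

-- ===== PRECONDITION & SPEC =====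
def Spec_expected_graph_first_order_py (seed_ids : List String) (graph_ids : List String) (depth_map : List (String × Int)) (parent_map : List (String × Option String)) (out : List String) : Prop := out = expected_graph_first_order_py_alt seed_ids graph_ids depth_map parent_map
instance (seed_ids : List String) (graph_ids : List String) (depth_map : List (String × Int)) (parent_map : List (String × Option String)) (out : List String) : Decidable (Spec_expected_graph_first_order_py seed_ids graph_ids depth_map parent_map out) := by unfold Spec_expected_graph_first_order_py; infer_instance

-- ===== CLAIM (what is proved, stated in full; the proofs are below) =====
def Claim_equal_expected_graph_first_order_py : Prop := ∀ (seed_ids : List String) (graph_ids : List String) (depth_map : List (String × Int)) (parent_map : List (String × Option String)), Dom_expected_graph_first_order_py seed_ids graph_ids depth_map parent_map → Spec_expected_graph_first_order_py seed_ids graph_ids depth_map parent_map (expected_graph_first_order_py seed_ids graph_ids depth_map parent_map)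

-- ===== LEMMAS AND PROOFS =====

lemma pv_set_contains_iff (xs : List String) (s : String) :
    PySem.Set.contains (PySem.Set.ofList xs) s = true ↔ s ∈ xs := by
  simp [PySem.Set.contains, PySem.Set.mem_ofList]

-- the {s: [] for s in seed_ids} dict: keys, and every value is []
lemma pv_init_contains (l : List String) : ∀ (d : PySem.Dict String (List String)) (s : String),
    (l.foldl (fun d s => d.insert s ([] : List String)) d).contains s = true ↔ (d.contains s = true ∨ s ∈ l) := by
  
  induction l with
  | nil => intro d s; simp
  | cons a l ih =>
    intro d s
    rw [List.foldl_cons, ih]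
    simp [PySem.Dict.contains_insert, List.mem_cons]
    tauto

lemma pv_init_getD (l : List String) : ∀ (d : PySem.Dict String (List String)) (s : String),
    (l.foldl (fun d s => d.insert s ([] : List String)) d).getD s ([] : List String)
      = if s ∈ l then [] else d.getD s [] := by
  
  induction l with
  | nil => intro d s; simp
  | cons a l ih =>
    intro d s
    rw [List.foldl_cons, ih]
    by_cases h1 : s ∈ l <;> by_cases h2 : s = a <;>
      simp [h1, h2, PySem.Dict.getD_insert, List.mem_cons]

-- A's grouping loop: the bucket of s collects, in order, the nodes whose root is s
lemma pv_foldA_getD (root : String → Option String) (l : List String) :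
    ∀ (d : PySem.Dict String (List String)) (s : String),
    (l.foldl (pvStepA root) d).getD s []
      = d.getD s [] ++ (if d.contains s then l.filter (fun n => root n == some s) else []) := by
  
  induction l with
  | nil => intro d s; cases h : d.contains s <;> simp [h]
  | cons n rest ih =>
    intro d s
    rcases hr : root n with _ | r
    · simp only [List.foldl_cons, pvStepA, hr]
      rw [ih]
      cases h : d.contains s <;> simp [h, List.filter_cons, hr]
    · simp only [List.foldl_cons, pvStepA, hr]
      by_cases hc : d.contains r = true
      · rw [if_pos hc, ih]
        simp only [PySem.Dict.modify]
        rw [PySem.Dict.getD_insert]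
        by_cases hrs : s = r
        · subst hrs
          have hcs : ((d.insert s (d.getD s [] ++ [n])).contains s) = true := by
            rw [PySem.Dict.contains_insert]; simp
          rw [if_pos hcs, if_pos hc]
          simp [List.filter_cons, hr]
        · have hci : ((d.insert r (d.getD r [] ++ [n])).contains s) = d.contains s := by
            rw [PySem.Dict.contains_insert]
            simp [hrs]
          simp only [hci]
          rw [if_neg hrs]
          cases h : d.contains s <;>
            simp [h, List.filter_cons, hr, Ne.symm hrs]
      · rw [if_neg hc, ih]
        by_cases hcs : d.contains s = true
        · have hrs : r ≠ s := fun h => hc (h ▸ hcs)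
          simp [hcs, List.filter_cons, hr, hrs]
        · simp [hcs]

-- B's bucketing loop
lemma pv_foldB_getD (c : String → Bool) (root : String → Option String) (l : List String) :
    ∀ (d : PySem.Dict String (List String)) (s : String), c s = true →
    (l.foldl (pvStepB c root) d).getD s []
      = d.getD s [] ++ l.filter (fun n => !c n && (root n == some s)) := by
  
  induction l with
  | nil => intro d s _; simp
  | cons n rest ih =>
    intro d s hcs
    by_cases hn : c n = true
    · simp only [List.foldl_cons, pvStepB, if_pos hn]
      rw [ih _ _ hcs]
      simp [List.filter_cons, hn]
    · simp only [List.foldl_cons, pvStepB, if_neg hn]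
      have hn' : c n = false := by cases h : c n; rfl; exact absurd h hn
      rcases hr : root n with _ | r
      · simp only [hr]
        rw [ih _ _ hcs]
        simp [List.filter_cons, hr, hn']
      · simp only [hr]
        by_cases hcr : c r = true
        · rw [if_pos hcr, ih _ _ hcs, PySem.Dict.getD_insert]
          by_cases hrs : s = r
          · subst hrs
            simp [List.filter_cons, hr, hn']
          · rw [if_neg hrs]
            simp [List.filter_cons, hr, hn', Ne.symm hrs]
        · rw [if_neg hcr, ih _ _ hcs]
          have hrs : r ≠ s := fun h => hcr (h ▸ hcs)
          simp [List.filter_cons, hr, hn', hrs]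

-- ----- stable insertion sort commutes with filter -----

lemma pv_insertBy_filter_neg (lt : String → String → Bool) (p : String → Bool) (x : String)
    (hx : p x = false) : ∀ (l : List String),
    (PySem.List.insertBy lt x l).filter p = l.filter p := by
  
  intro l
  induction l with
  | nil => simp [PySem.List.insertBy, hx]
  | cons y ys ih =>
    by_cases h : lt x y = true
    · simp [PySem.List.insertBy, h, hx]
    · simp only [PySem.List.insertBy, if_neg h]
      cases hp : p y <;> simp [List.filter_cons, hp, ih]

lemma pv_insertBy_all_lt (lt : String → String → Bool) (x : String) (l : List String)
    (h : ∀ z ∈ l, lt x z = true) : PySem.List.insertBy lt x l = x :: l := by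
  
  cases l with
  | nil => simp [PySem.List.insertBy]
  | cons y ys => simp [PySem.List.insertBy, h y List.mem_cons_self]

lemma pv_insertBy_filter_pos (lt : String → String → Bool)
    (Hglue : ∀ a b c, lt a b = true → lt c b = false → lt a c = true)
    (p : String → Bool) (x : String) (hx : p x = true) : ∀ (l : List String),
    l.Pairwise (fun a b => lt b a = false) →
    (PySem.List.insertBy lt x l).filter p = PySem.List.insertBy lt x (l.filter p) := by
  
  intro l
  induction l with
  | nil => intro _; simp [PySem.List.insertBy, hx]
  | cons y ys ih =>
    intro hpw
    obtain ⟨hy, hys⟩ := List.pairwise_cons.mp hpw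
    by_cases h : lt x y = true
    · have hall : ∀ z ∈ y :: ys, lt x z = true := by
        intro z hz
        rcases List.mem_cons.mp hz with hz | hz
        · subst hz; exact h
        · exact Hglue x y z h (hy z hz)
      have l1 : PySem.List.insertBy lt x (y :: ys) = x :: y :: ys := by
        simp [PySem.List.insertBy, h]
      rw [l1, pv_insertBy_all_lt lt x _ (fun z hz => hall z (List.mem_of_mem_filter hz))]
      simp [List.filter_cons, hx]
    · have l1 : PySem.List.insertBy lt x (y :: ys) = y :: PySem.List.insertBy lt x ys := by
        simp [PySem.List.insertBy, h]
      rw [l1]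
      cases hp : p y
      · simp only [List.filter_cons, hp]
        simp only [Bool.false_eq_true, if_neg]
        exact ih hys
      · simp only [List.filter_cons, hp, if_pos]
        rw [ih hys]
        have l2 : PySem.List.insertBy lt x (y :: List.filter p ys) = y :: PySem.List.insertBy lt x (List.filter p ys) := by
          simp [PySem.List.insertBy, h]
        simp [l2]

lemma pv_pairwise_insertBy (lt : String → String → Bool)
    (Hasym : ∀ a b, lt a b = true → lt b a = false)
    (Hglue : ∀ a b c, lt a b = true → lt c b = false → lt a c = true)
    (x : String) (l : List String) : l.Pairwise (fun a b => lt b a = false) →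
    (PySem.List.insertBy lt x l).Pairwise (fun a b => lt b a = false) := by
  induction l with
  | nil => intro _; simp [PySem.List.insertBy]
  | cons y ys ih =>
    intro h
    obtain ⟨hy, hys⟩ := List.pairwise_cons.mp h
    by_cases hxy : lt x y = true
    · have l1 : PySem.List.insertBy lt x (y :: ys) = x :: y :: ys := by
        simp [PySem.List.insertBy, hxy]
      rw [l1]
      refine List.Pairwise.cons ?_ h
      intro z hz
      rcases List.mem_cons.mp hz with rfl | hz
      · exact Hasym x z hxy
      · exact Hasym x z (Hglue x y z hxy (hy z hz))
    · have l1 : PySem.List.insertBy lt x (y :: ys) = y :: PySem.List.insertBy lt x ys := by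
        simp [PySem.List.insertBy, hxy]
      rw [l1]
      refine List.Pairwise.cons ?_ (ih hys)
      intro z hz
      rw [PySem.List.mem_insertBy] at hz
      rcases hz with rfl | hz
      · cases hlt : lt z y
        · rfl
        · exact absurd hlt hxy
      · exact hy z hz

lemma pv_foldl_insertBy_filter (lt : String → String → Bool)
    (Hasym : ∀ a b, lt a b = true → lt b a = false)
    (Hglue : ∀ a b c, lt a b = true → lt c b = false → lt a c = true)
    (p : String → Bool) : ∀ (xs acc : List String), acc.Pairwise (fun a b => lt b a = false) →
    (xs.foldl (fun acc x => PySem.List.insertBy lt x acc) acc).filter p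
      = (xs.filter p).foldl (fun acc x => PySem.List.insertBy lt x acc) (acc.filter p) := by
  
  intro xs
  induction xs with
  | nil => intro acc _; simp
  | cons x xs ih =>
    intro acc h
    simp only [List.foldl_cons]
    rw [ih _ (pv_pairwise_insertBy lt Hasym Hglue x acc h)]
    cases hx : p x
    · rw [pv_insertBy_filter_neg lt p x hx acc]
      simp [List.filter_cons, hx]
    · rw [pv_insertBy_filter_pos lt Hglue p x hx acc h]
      simp [List.filter_cons, hx]

lemma pv_sorted2_filter (k1 : String → Int) (p : String → Bool) (xs : List String) :
    (PySem.List.sorted2 xs k1 (fun n => n)).filter p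
      = PySem.List.sorted2 (xs.filter p) k1 (fun n => n) := by
  
  have key : ∀ (ys : List String), PySem.List.sorted2 ys k1 (fun n => n)
      = ys.foldl (fun acc x => PySem.List.insertBy
          (fun a b => decide (k1 a < k1 b) || (!decide (k1 b < k1 a) && decide (a < b))) x acc) [] :=
    fun ys => rfl
  have Hasym : ∀ a b : String,
      (decide (k1 a < k1 b) || (!decide (k1 b < k1 a) && decide (a < b))) = true →
      (decide (k1 b < k1 a) || (!decide (k1 a < k1 b) && decide (b < a))) = false := by
    intro a b hab
    cases hba : (decide (k1 b < k1 a) || (!decide (k1 a < k1 b) && decide (b < a)))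
    · rfl
    · exfalso
      simp only [Bool.or_eq_true, Bool.and_eq_true, Bool.not_eq_true', decide_eq_true_eq,
        decide_eq_false_iff_not] at hab hba
      rcases hab with h1 | ⟨h2, h3⟩ <;> rcases hba with g1 | ⟨g2, g3⟩
      · exact absurd h1 (lt_asymm g1)
      · exact g2 h1
      · exact h2 g1
      · exact absurd h3 (lt_asymm g3)
  have Hglue : ∀ a b c : String,
      (decide (k1 a < k1 b) || (!decide (k1 b < k1 a) && decide (a < b))) = true →
      (decide (k1 c < k1 b) || (!decide (k1 b < k1 c) && decide (c < b))) = false →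
      (decide (k1 a < k1 c) || (!decide (k1 c < k1 a) && decide (a < c))) = true := by
    intro a b c hab hcb
    simp only [Bool.or_eq_true, Bool.and_eq_true, Bool.not_eq_true', decide_eq_true_eq,
      decide_eq_false_iff_not] at hab ⊢
    have hcb' : ¬ ((k1 c < k1 b) ∨ (¬ (k1 b < k1 c) ∧ c < b)) := by
      intro hor
      have htrue : (decide (k1 c < k1 b) || (!decide (k1 b < k1 c) && decide (c < b))) = true := by
        rcases hor with hh | ⟨hh1, hh2⟩
        · simp [hh]
        · simp [hh1, hh2]
      rw [hcb] at htrue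
      exact Bool.false_ne_true htrue
    have hcb1 : ¬ k1 c < k1 b := fun hh => hcb' (Or.inl hh)
    have hcb2 : ¬ k1 b < k1 c → ¬ c < b := fun hu hv => hcb' (Or.inr ⟨hu, hv⟩)
    have hbc : k1 b ≤ k1 c := not_lt.mp hcb1
    rcases hab with h1 | ⟨h2, h3⟩
    · exact Or.inl (lt_of_lt_of_le h1 hbc)
    · have hab' : k1 a ≤ k1 b := not_lt.mp h2
      by_cases hlt : k1 a < k1 c
      · exact Or.inl hlt
      · have hac : k1 a = k1 c := le_antisymm (le_trans hab' hbc) (not_lt.mp hlt)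
        have hnb : ¬ k1 b < k1 c := by omega
        have hscb : ¬ c < b := hcb2 hnb
        refine Or.inr ⟨by omega, lt_of_lt_of_le h3 (not_lt.mp hscb)⟩
  rw [key, key]
  exact pv_foldl_insertBy_filter _ Hasym Hglue p xs [] List.Pairwise.nil

lemma pv_filter_filter (l : List String) (p q : String → Bool) :
    (l.filter p).filter q = l.filter (fun a => p a && q a) := by
  induction l with
  | nil => rfl
  | cons a l ih => cases hp : p a <;> cases hq : q a <;> simp [List.filter_cons, hp, hq, ih]

-- the whole equality, with the seed-membership test, the root resolver and the depth key
-- abstracted so that the terms stay small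
lemma pv_main (c : String → Bool) (root : String → Option String) (k1 : String → Int)
    (seed_ids graph_ids : List String)
    (hc : ∀ s, s ∈ seed_ids ↔ c s = true) :
    seed_ids.foldl (fun acc seed => acc ++ [seed] ++
      ((PySem.List.sorted2 (graph_ids.filter (fun nid => !c nid)) k1 (fun nid => nid)).foldl
          (pvStepA root)
          (seed_ids.foldl (fun d s => d.insert s ([] : List String)) (PySem.Dict.mk []))).getD seed []) []
    = seed_ids.foldl (fun acc seed => acc ++ [seed] ++
        PySem.List.sorted2 ((graph_ids.foldl (pvStepB c root)
            (PySem.Dict.mk [])).getD seed []) k1 (fun n => n)) [] := by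
  apply PySem.List.foldl_congr_mem
  intro acc s hs
  congr 1
  rw [pv_foldA_getD root]
  rw [pv_foldB_getD c root graph_ids (PySem.Dict.mk []) s ((hc s).mp hs)]
  have hct : ((seed_ids.foldl (fun d s => d.insert s ([] : List String)) (PySem.Dict.mk [])).contains s) = true :=
    (pv_init_contains seed_ids (PySem.Dict.mk []) s).mpr (Or.inr hs)
  rw [if_pos hct, pv_init_getD, if_pos hs]
  have hemp : (PySem.Dict.mk ([] : List (String × List String))).getD s [] = [] := rfl
  rw [hemp]
  simp only [List.nil_append]
  rw [pv_sorted2_filter, pv_filter_filter]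

-- ===== VERDICT (by name: the statement is the Claim_ definition above) =====
theorem expected_graph_first_order_py_spec : Claim_equal_expected_graph_first_order_py := by
  intro seed_ids graph_ids depth_map parent_map _hdom
  unfold Spec_expected_graph_first_order_py
  simp only [expected_graph_first_order_py, expected_graph_first_order_py_alt]
  exact pv_main (PySem.Set.contains (PySem.Set.ofList seed_ids))
    (pvRootSeed (PySem.Set.ofList seed_ids) (PySem.Dict.mk parent_map) 10000)
    (fun nid => (PySem.Dict.mk depth_map).getD nid 999999) seed_ids graph_ids
    (fun s => (pv_set_contains_iff seed_ids s).symm)
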